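-- pv_equiv track=rewrite | github.com/Myriware-Solutions/mylange | interpreter.py | confine_qoutes
-- ===== SOURCE A (Python) =====
-- def confine_qoutes(s:str):
--     i = 0
--     result = []
--     last_index = 0
--     blocks = {}
--     single_index = 0
--     double_index = 0
--
--     while i < len(s):
--         if s[i] in {"'", '"'}:
--             quote_char = s[i]
--             start = i
--             i += 1
--             escaped = False
--             while i < len(s):
--                 if s[i] == '\\' and not escaped:
--                     escaped = True
--                 elif s[i] == quote_char and not escaped:
--                     break
--                 else:
--                     escaped = False
--                 i += 1
--             if i < len(s) and s[i] == quote_char: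
--                 end = i + 1
--                 block = s[start:end]
--                 if quote_char == "'":
--                     key = f"1x{single_index:X}"
--                     single_index += 1
--                 else:
--                     key = f"2x{double_index:X}"
--                     double_index += 1
--                 blocks[key] = block
--                 result.append(s[last_index:start])
--                 result.append(key)
--                 last_index = end
--         i += 1
--
--     result.append(s[last_index:])
--     return ''.join(result), blocks
-- ===== SOURCE B (Python) =====
-- def _find_close(s, j, q):
--     # index of the closing quote q scanning from j, treating backslash + next char as one unit
--     n = len(s)
--     while j < n:
--         if s[j] == '\\':
--             j += 2
--         elif s[j] == q:
--             return j
--         else: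
--             j += 1
--     return None
--
-- def confine_qoutes(s: str):
--     out = []
--     blocks = {}
--     singles = 0
--     doubles = 0
--     i = 0
--     n = len(s)
--     while i < n:
--         c = s[i]
--         if c == "'" or c == '"':
--             close = _find_close(s, i + 1, c)
--             if close is None:
--                 out.append(s[i:])
--                 break
--             if c == "'":
--                 key = "1x" + format(singles, 'X')
--                 singles += 1
--             else:
--                 key = "2x" + format(doubles, 'X')
--                 doubles += 1
--             blocks[key] = s[i:close + 1]
--             out.append(key)
--             i = close + 1
--         else:
--             out.append(c)
--             i += 1
--     return ''.join(out), blocks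
-- ===== Notes on version B (the rewrite author's own statement) =====
-- stated objective: simpler
-- what changed: Replaces A's single while with an escape-state flag, slice bookkeeping via last_index and a deferred tail append by a helper that locates the closing quote directly (consuming backslash+next as one unit, no boolean state) and a driver loop that emits output incrementally per character/token.
import Mathlib
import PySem

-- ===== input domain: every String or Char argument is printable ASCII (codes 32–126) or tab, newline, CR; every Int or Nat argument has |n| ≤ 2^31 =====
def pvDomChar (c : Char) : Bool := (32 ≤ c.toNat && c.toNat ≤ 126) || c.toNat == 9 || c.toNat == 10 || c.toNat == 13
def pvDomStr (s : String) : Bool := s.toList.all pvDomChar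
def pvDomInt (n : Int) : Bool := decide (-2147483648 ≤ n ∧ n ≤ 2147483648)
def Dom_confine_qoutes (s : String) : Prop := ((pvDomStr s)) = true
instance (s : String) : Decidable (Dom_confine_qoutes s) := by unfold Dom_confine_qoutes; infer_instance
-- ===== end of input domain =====

-- B replaces A's escape-flag state machine and last_index slice bookkeeping by a
-- closing-quote search helper (backslash+next consumed as one unit) and a driver
-- that emits output incrementally; objective: simpler.
-- Loops are ported as structural recursion on a fuel argument that only makes the
-- recursion total: with the fuel each top-level call passes, the zero case is never reached.

-- shared helper: f"{n:X}" / format(n, 'X') for n ≥ 0 (uppercase hex, "0" for 0)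
def pvHexDigit (n : Nat) : Char := if n < 10 then Char.ofNat (48 + n) else Char.ofNat (55 + n)

def pvHexGo : Nat → Nat → List Char
  | 0, _ => []
  | fuel + 1, n => if n = 0 then [] else pvHexGo fuel (n / 16) ++ [pvHexDigit (n % 16)]

def pvHexU (n : Nat) : List Char := if n = 0 then ['0'] else pvHexGo (n + 1) n

-- ===== PORT A =====
-- inner while loop of A: from index i with escape flag, returns the index where the loop leaves i
def pvInnerA (s : List Char) (q : Char) : Nat → Nat → Bool → Nat
  | 0, i, _ => i
  | fuel + 1, i, escaped =>
    if h : i < s.length then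
      if s[i] = '\\' ∧ escaped = false then pvInnerA s q fuel (i + 1) true
      else if s[i] = q ∧ escaped = false then i
      else pvInnerA s q fuel (i + 1) false
    else i

-- outer while loop of A; state = (i, last_index, result, blocks, single_index, double_index)
def pvOuterA (s : List Char) : Nat → Nat → Nat → List (List Char) →
    PySem.Dict String String → Nat → Nat → String × List (String × String)
  | 0, _, lastIndex, result, blocks, _, _ =>
    (String.ofList (PySem.Chars.join []
        (result ++ [PySem.List.slice s (some (lastIndex : Int)) none])), blocks.items)
  | fuel + 1, i, lastIndex, result, blocks, singleIdx, doubleIdx =>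
    if h : i < s.length then
      if s[i] = '\'' ∨ s[i] = '"' then
        let q := s[i]
        let j := pvInnerA s q s.length (i + 1) false
        if hj : j < s.length then
          if s[j] = q then
            let block := PySem.List.slice s (some (i : Int)) (some ((j + 1 : Nat) : Int))
            let key := if q = '\'' then String.ofList ('1' :: 'x' :: pvHexU singleIdx)
                       else String.ofList ('2' :: 'x' :: pvHexU doubleIdx)
            pvOuterA s fuel (j + 1) (j + 1)
              (result ++ [PySem.List.slice s (some (lastIndex : Int)) (some (i : Int)), key.toList])
              (blocks.insert key (String.ofList block))
              (if q = '\'' then singleIdx + 1 else singleIdx)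
              (if q = '\'' then doubleIdx else doubleIdx + 1)
          else pvOuterA s fuel (j + 1) lastIndex result blocks singleIdx doubleIdx
        else pvOuterA s fuel (j + 1) lastIndex result blocks singleIdx doubleIdx
      else pvOuterA s fuel (i + 1) lastIndex result blocks singleIdx doubleIdx
    else
      (String.ofList (PySem.Chars.join []
          (result ++ [PySem.List.slice s (some (lastIndex : Int)) none])), blocks.items)

def confine_qoutes (s : String) : String × (List (String × String)) :=
  pvOuterA s.toList (s.toList.length + 1) 0 0 [] (PySem.Dict.mk []) 0 0

-- ===== PORT B =====
-- helper _find_close of Source B: index of the closing quote, backslash + next char skipped as a pair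
def pvFindClose (s : List Char) (q : Char) : Nat → Nat → Option Nat
  | 0, _ => none
  | fuel + 1, j =>
    if h : j < s.length then
      if s[j] = '\\' then pvFindClose s q fuel (j + 2)
      else if s[j] = q then some j
      else pvFindClose s q fuel (j + 1)
    else none

-- main while loop of Source B; state = (i, out, blocks, singles, doubles)
def pvOuterB (s : List Char) : Nat → Nat → List (List Char) →
    PySem.Dict String String → Nat → Nat → String × List (String × String)
  | 0, _, out, blocks, _, _ => (String.ofList (PySem.Chars.join [] out), blocks.items)
  | fuel + 1, i, out, blocks, singles, doubles =>
    if h : i < s.length then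
      if s[i] = '\'' ∨ s[i] = '"' then
        match pvFindClose s s[i] s.length (i + 1) with
        | none =>
            (String.ofList (PySem.Chars.join []
                (out ++ [PySem.List.slice s (some (i : Int)) none])), blocks.items)
        | some close =>
            let key := if s[i] = '\'' then String.ofList ('1' :: 'x' :: pvHexU singles)
                       else String.ofList ('2' :: 'x' :: pvHexU doubles)
            pvOuterB s fuel (close + 1) (out ++ [key.toList])
              (blocks.insert key
                (String.ofList (PySem.List.slice s (some (i : Int)) (some ((close + 1 : Nat) : Int)))))
              (if s[i] = '\'' then singles + 1 else singles)
              (if s[i] = '\'' then doubles else doubles + 1)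
      else pvOuterB s fuel (i + 1) (out ++ [[s[i]]]) blocks singles doubles
    else (String.ofList (PySem.Chars.join [] out), blocks.items)

def confine_qoutes_alt (s : String) : String × (List (String × String)) :=
  pvOuterB s.toList (s.toList.length + 1) 0 [] (PySem.Dict.mk []) 0 0

-- ===== PRECONDITION & SPEC =====
def Spec_confine_qoutes (s : String) (out : String × (List (String × String))) : Prop := out = confine_qoutes_alt s
instance (s : String) (out : String × (List (String × String))) : Decidable (Spec_confine_qoutes s out) := by unfold Spec_confine_qoutes; infer_instance

-- ===== CLAIM (what is proved, stated in full; the proofs are below) =====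
def Claim_equal_confine_qoutes : Prop := ∀ (s : String), Dom_confine_qoutes s → Spec_confine_qoutes s (confine_qoutes s)

-- ===== LEMMAS AND PROOFS =====

theorem pvFindClose_ge (s : List Char) (q : Char) : ∀ fuel j k,
    pvFindClose s q fuel j = some k → j ≤ k := by
  intro fuel
  induction fuel with
  | zero => intro j k hf; exact absurd hf (by simp [pvFindClose])
  | succ n ih =>
    intro j k hf
    rw [pvFindClose] at hf
    split at hf
    · split at hf
      · exact le_trans (by omega) (ih (j+2) k hf)
      · split at hf
        · exact Nat.le_of_eq (Option.some.inj hf)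
        · exact le_trans (by omega) (ih (j+1) k hf)
    · exact absurd hf (by simp)

-- where B's helper answers, there really is the quote
theorem pvFindClose_spec (s : List Char) (q : Char) : ∀ fuel j k,
    pvFindClose s q fuel j = some k → ∃ hk : k < s.length, s[k] = q := by
  intro fuel
  induction fuel with
  | zero => intro j k hf; exact absurd hf (by simp [pvFindClose])
  | succ n ih =>
    intro j k hf
    rw [pvFindClose] at hf
    split at hf
    · rename_i hj
      split at hf
      · exact ih (j+2) k hf
      · split at hf
        · rename_i hq
          obtain rfl : j = k := Option.some.inj hf
          exact ⟨hj, hq⟩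
        · exact ih (j+1) k hf
    · exact absurd hf (by simp)

theorem pvInnerA_stop (s : List Char) (q : Char) {i : Nat} (hie : s.length ≤ i) :
    ∀ fuel e, pvInnerA s q fuel i e = i := by
  intro fuel e
  cases fuel with
  | zero => rfl
  | succ n => rw [pvInnerA, dif_neg (by omega)]

theorem pvFindClose_stop (s : List Char) (q : Char) {j : Nat} (hje : s.length ≤ j) :
    ∀ fuel, pvFindClose s q fuel j = none := by
  intro fuel
  cases fuel with
  | zero => rfl
  | succ n => rw [pvFindClose, dif_neg (by omega)]

-- A's inner loop computes s.length when B's helper finds no closing quote, else exactly the helper's index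
theorem pvInner_eq_findClose (s : List Char) (q : Char) : ∀ n i fa ff,
    s.length - i ≤ n → s.length - i ≤ fa → s.length - i ≤ ff → i ≤ s.length →
    pvInnerA s q fa i false = (pvFindClose s q ff i).elim s.length id := by
  intro n
  induction n with
  | zero =>
    intro i fa ff hn hfa hff hi
    rw [pvInnerA_stop s q (by omega), pvFindClose_stop s q (by omega)]
    simp; omega
  | succ n ih =>
    intro i fa ff hn hfa hff hi
    by_cases h : i < s.length
    · obtain ⟨fa', rfl⟩ : ∃ m, fa = m + 1 := ⟨fa - 1, by omega⟩
      obtain ⟨ff', rfl⟩ : ∃ m, ff = m + 1 := ⟨ff - 1, by omega⟩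
      rw [pvInnerA, pvFindClose, dif_pos h, dif_pos h]
      by_cases hb : s[i] = '\\'
      · rw [if_pos ⟨hb, rfl⟩, if_pos hb]
        by_cases h1 : i + 1 < s.length
        · obtain ⟨fa'', rfl⟩ : ∃ m, fa' = m + 1 := ⟨fa' - 1, by omega⟩
          rw [pvInnerA, dif_pos h1, if_neg (by simp), if_neg (by simp)]
          exact ih (i + 2) fa'' ff' (by omega) (by omega) (by omega) (by omega)
        · rw [pvInnerA_stop s q (by omega), pvFindClose_stop s q (by omega)]
          simp; omega
      · rw [if_neg (by simp [hb]), if_neg hb]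
        by_cases hq : s[i] = q
        · rw [if_pos ⟨hq, rfl⟩, if_pos hq]; rfl
        · rw [if_neg (by simp [hq]), if_neg hq]
          exact ih (i + 1) fa' ff' (by omega) (by omega) (by omega) (by omega)
    · rw [pvInnerA_stop s q (by omega), pvFindClose_stop s q (by omega)]
      simp; omega

theorem interspNil : ∀ l : List (List Char), (List.intersperse [] l).flatten = l.flatten
  | [] => rfl
  | [_] => rfl
  | x :: y :: t => by
    simp only [List.intersperse, List.flatten_cons, List.nil_append]
    rw [interspNil (y :: t)]
    simp

theorem joinNil (l : List (List Char)) : PySem.Chars.join [] l = l.flatten := by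
  simp [PySem.Chars.join, List.intercalate, interspNil]

theorem pvOuterA_stop (s : List Char) {i : Nat} (hie : s.length ≤ i)
    (lastIndex : Nat) (result : List (List Char)) (blocks : PySem.Dict String String)
    (cS cD : Nat) : ∀ fuel, pvOuterA s fuel i lastIndex result blocks cS cD =
      (String.ofList (PySem.Chars.join []
        (result ++ [PySem.List.slice s (some (lastIndex : Int)) none])), blocks.items) := by
  intro fuel
  cases fuel with
  | zero => rfl
  | succ n => rw [pvOuterA, dif_neg (by omega)]

theorem pvOuterB_stop (s : List Char) {i : Nat} (hie : s.length ≤ i)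
    (out : List (List Char)) (blocks : PySem.Dict String String)
    (cS cD : Nat) : ∀ fuel, pvOuterB s fuel i out blocks cS cD =
      (String.ofList (PySem.Chars.join [] out), blocks.items) := by
  intro fuel
  cases fuel with
  | zero => rfl
  | succ n => rw [pvOuterB, dif_neg (by omega)]

-- both loops agree once the scan is past the end of the string
theorem pvOuter_terminal (s : List Char) {i : Nat} (lastIndex : Nat)
    (result out : List (List Char)) (blocks : PySem.Dict String String) (cS cD : Nat)
    (hie : s.length ≤ i) (hli : lastIndex ≤ i)
    (hinv : out.flatten = result.flatten ++ (s.drop lastIndex).take (i - lastIndex)) :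
    ∀ fa fb, pvOuterA s fa i lastIndex result blocks cS cD = pvOuterB s fb i out blocks cS cD := by
  intro fa fb
  rw [pvOuterA_stop s hie lastIndex result blocks cS cD fa, pvOuterB_stop s hie out blocks cS cD fb]
  have hfin : (result ++ [PySem.List.slice s (some (lastIndex : Int)) none]).flatten = out.flatten := by
    rw [List.flatten_append]
    simp only [List.flatten_cons, List.flatten_nil, List.append_nil]
    rw [PySem.List.slice_from s (by positivity), Int.toNat_natCast, hinv]
    congr 1
    rw [List.take_of_length_le (by simp; omega)]
  rw [joinNil, joinNil, hfin]

-- loop correspondence: A's (result, last_index) pending-slice representation equals B's incremental out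
theorem pvOuter_eq (s : List Char) : ∀ n i lastIndex result out blocks cS cD fa fb,
    s.length - i ≤ n → s.length - i < fa → s.length - i < fb → lastIndex ≤ i → i ≤ s.length →
    out.flatten = result.flatten ++ (s.drop lastIndex).take (i - lastIndex) →
    pvOuterA s fa i lastIndex result blocks cS cD = pvOuterB s fb i out blocks cS cD := by
  intro n
  induction n with
  | zero =>
    intro i last result out blocks cS cD fa fb hn hfa hfb hli hil hinv
    exact pvOuter_terminal s last result out blocks cS cD (by omega) hli hinv fa fb
  | succ n ih =>
    intro i last result out blocks cS cD fa fb hn hfa hfb hli hil hinv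
    by_cases h : i < s.length
    · obtain ⟨fa', rfl⟩ : ∃ m, fa = m + 1 := ⟨fa - 1, by omega⟩
      obtain ⟨fb', rfl⟩ : ∃ m, fb = m + 1 := ⟨fb - 1, by omega⟩
      rw [pvOuterA, pvOuterB, dif_pos h, dif_pos h]
      by_cases hq : s[i] = '\'' ∨ s[i] = '"'
      · rw [if_pos hq, if_pos hq]
        have hrel := pvInner_eq_findClose s s[i] (s.length - (i+1)) (i+1) s.length s.length
          (by omega) (by omega) (by omega) (by omega)
        cases hfc : pvFindClose s s[i] s.length (i+1) with
        | none =>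
          rw [hfc] at hrel
          simp only [Option.elim] at hrel
          simp only [hrel, dif_neg (lt_irrefl s.length)]
          rw [pvOuterA_stop s (by omega)]
          have hfin : (result ++ [PySem.List.slice s (some (last : Int)) none]).flatten
              = (out ++ [PySem.List.slice s (some (i : Int)) none]).flatten := by
            rw [List.flatten_append, List.flatten_append]
            simp only [List.flatten_cons, List.flatten_nil, List.append_nil]
            rw [PySem.List.slice_from s (by positivity), PySem.List.slice_from s (by positivity),
              Int.toNat_natCast, Int.toNat_natCast, hinv, List.append_assoc]
            congr 1
            have hdd : s.drop i = (s.drop last).drop (i - last) := by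
              rw [List.drop_drop]; congr 1; omega
            rw [hdd, List.take_append_drop]
          rw [joinNil, joinNil, hfin]
        | some k =>
          rw [hfc] at hrel
          simp only [Option.elim, id] at hrel
          obtain ⟨hk, hkq⟩ := pvFindClose_spec s s[i] s.length (i+1) k hfc
          have hge := pvFindClose_ge s s[i] s.length (i+1) k hfc
          simp only [hrel, dif_pos hk, if_pos hkq]
          apply ih
          · omega
          · omega
          · omega
          · omega
          · omega
          · simp only [List.flatten_append, List.flatten_cons, List.flatten_nil, List.append_nil,
              PySem.List.slice_natCast, hinv, Nat.sub_self, List.take_zero]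
            simp
      · rw [if_neg hq, if_neg hq]
        apply ih
        · omega
        · omega
        · omega
        · omega
        · omega
        · have hstep : (s.drop last).take (i + 1 - last) = (s.drop last).take (i - last) ++ [s[i]] := by
            have h1 : i + 1 - last = (i - last) + 1 := by omega
            rw [h1, List.take_add_one]
            congr 1
            rw [List.getElem?_drop]
            have h2 : last + (i - last) = i := by omega
            rw [h2, List.getElem?_eq_getElem h]
            rfl
          simp [List.flatten_append, hinv, hstep]
    · exact pvOuter_terminal s last result out blocks cS cD (by omega) hli hinv _ _

-- ===== VERDICT (by name: the statement is the Claim_ definition above) =====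
theorem confine_qoutes_spec : Claim_equal_confine_qoutes := by
  intro s _
  show confine_qoutes s = confine_qoutes_alt s
  unfold confine_qoutes confine_qoutes_alt
  exact pvOuter_eq s.toList s.toList.length 0 0 [] [] (PySem.Dict.mk []) 0 0 _ _
    (by omega) (by omega) (by omega) (by omega) (by omega) (by simp)
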